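-- pv_equiv track=rewrite | github.com/hilbertdu/Helium | Build/TypeParser.py | ModuleToTokenName
-- ===== SOURCE A (Python) =====
-- def ModuleToTokenName( moduleName ):
--     lastCharacter = None
--     wasLastCharacterUpper = False
--     wasLastCharacterDot = False
--     tokenName = ''
--     for rawCharacter in moduleName:
--         character = rawCharacter.upper()
--         isCharacterUpper = ( character == rawCharacter )
--         if wasLastCharacterDot or (not isCharacterUpper and wasLastCharacterUpper and tokenName != ''):
--             tokenName += '_'
--
--         if lastCharacter is not None:
--             tokenName += lastCharacter
--
--         lastCharacter = character
--         wasLastCharacterUpper = isCharacterUpper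
--         wasLastCharacterDot = (lastCharacter == '.')
--         if wasLastCharacterDot:
--             lastCharacter = None
--
--     if lastCharacter is not None:
--         tokenName += lastCharacter
--
--     return tokenName
-- ===== SOURCE B (Python) =====
-- def ModuleToTokenName(moduleName):
--     out = []
--     n = len(moduleName)
--     for i in range(n):
--         c = moduleName[i]
--         if c == '.':
--             if i != n - 1:
--                 out.append('_')
--         else:
--             u = c.upper()
--             if out and c == u and i + 1 < n and moduleName[i + 1] != moduleName[i + 1].upper():
--                 out.append('_')
--             out.append(u)
--     return ''.join(out)
-- ===== Notes on version B (the rewrite author's own statement) =====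
-- stated objective: simpler
-- what changed: Replaces the one-character-delayed state machine (lastCharacter/wasLastCharacterUpper/wasLastCharacterDot buffer emitting the previous char) with a direct forward index pass that decides each underscore at its own position by one-character lookahead.
import Mathlib
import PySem

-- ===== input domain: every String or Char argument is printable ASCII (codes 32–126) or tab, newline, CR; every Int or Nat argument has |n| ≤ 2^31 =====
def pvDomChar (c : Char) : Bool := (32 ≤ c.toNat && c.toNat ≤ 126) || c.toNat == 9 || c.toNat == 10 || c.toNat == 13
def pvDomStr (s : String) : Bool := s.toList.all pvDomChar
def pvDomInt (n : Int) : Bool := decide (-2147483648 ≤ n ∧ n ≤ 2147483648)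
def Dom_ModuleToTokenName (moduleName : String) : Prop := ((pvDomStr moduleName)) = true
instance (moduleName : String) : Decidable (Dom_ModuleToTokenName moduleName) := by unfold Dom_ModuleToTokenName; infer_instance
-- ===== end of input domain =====

-- B replaces A's one-character-delayed state machine by a direct forward pass that decides
-- each underscore at its own position with one-character lookahead (objective: simpler).

-- ===== PORT A =====
-- A's loop state: (lastCharacter, wasLastCharacterUpper, wasLastCharacterDot, tokenName)
def pvStepA (st : Option Char × Bool × Bool × List Char) (c : Char) :
    Option Char × Bool × Bool × List Char :=
  let character := PySem.Chars.upperChar c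
  let isCharacterUpper : Bool := character == c
  let tok1 := if st.2.2.1 || (!isCharacterUpper && st.2.1 && !st.2.2.2.isEmpty)
              then st.2.2.2 ++ ['_'] else st.2.2.2
  let tok2 := match st.1 with
              | some lc => tok1 ++ [lc]
              | none => tok1
  let wasDot : Bool := character == '.'
  ((if wasDot then none else some character), isCharacterUpper, wasDot, tok2)

def ModuleToTokenName (moduleName : String) : String :=
  let st := moduleName.toList.foldl pvStepA (none, false, false, [])
  String.ofList (match st.1 with
                 | some lc => st.2.2.2 ++ [lc]
                 | none => st.2.2.2)

-- ===== PORT B =====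
-- B's loop over the rest of the string: head = current character, giving one-character lookahead
def pvGoB (acc : List Char) (l : List Char) : List Char :=
  match l with
  | [] => acc
  | c :: rest =>
    if c == '.' then
      pvGoB (if rest.isEmpty then acc else acc ++ ['_']) rest
    else
      let u := PySem.Chars.upperChar c
      let needUnd : Bool := !acc.isEmpty && c == u &&
        (match rest with
         | d :: _ => d != PySem.Chars.upperChar d
         | [] => false)
      pvGoB ((if needUnd then acc ++ ['_'] else acc) ++ [u]) rest

def ModuleToTokenName_alt (moduleName : String) : String :=
  String.ofList (pvGoB [] moduleName.toList)

-- ===== PRECONDITION & SPEC =====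
def Spec_ModuleToTokenName (moduleName : String) (out : String) : Prop := out = ModuleToTokenName_alt moduleName
instance (moduleName : String) (out : String) : Decidable (Spec_ModuleToTokenName moduleName out) := by unfold Spec_ModuleToTokenName; infer_instance

-- ===== CLAIM (what is proved, stated in full; the proofs are below) =====
def Claim_equal_ModuleToTokenName : Prop := ∀ (moduleName : String), Dom_ModuleToTokenName moduleName → Spec_ModuleToTokenName moduleName (ModuleToTokenName moduleName)

-- ===== LEMMAS AND PROOFS =====

-- the flush A performs after its loop
def pvFlush (st : Option Char × Bool × Bool × List Char) : List Char :=
  match st.1 with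
  | some lc => st.2.2.2 ++ [lc]
  | none => st.2.2.2

-- B's lookahead test: does the list start with a character changed by upper()?
def pvLow (l : List Char) : Bool :=
  match l with
  | d :: _ => d != PySem.Chars.upperChar d
  | [] => false

theorem pvUpperChar_eq_dot_iff (c : Char) : PySem.Chars.upperChar c = '.' ↔ c = '.' := by
  unfold PySem.Chars.upperChar PySem.Chars.islower
  constructor
  · intro h
    split_ifs at h with hl
    · exfalso
      simp only [Bool.and_eq_true, decide_eq_true_eq, Char.le_def,
        UInt32.le_iff_toNat_le] at hl
      have hn : 97 ≤ c.toNat ∧ c.toNat ≤ 122 := hl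
      have hv : (c.toNat - 32).isValidChar := Or.inl (by omega)
      have h2 : (Char.ofNat (c.toNat - 32)).toNat = ('.' : Char).toNat := by rw [h]
      rw [Char.toNat_ofNat, if_pos hv, (by decide : ('.' : Char).toNat = 46)] at h2
      omega
    · exact h
  · intro h; subst h; decide

theorem pvGoB_dot (acc rest : List Char) :
    pvGoB acc ('.' :: rest) = pvGoB (if rest.isEmpty then acc else acc ++ ['_']) rest := by
  simp [pvGoB]

theorem pvGoB_ne (c : Char) (hc : c ≠ '.') (acc rest : List Char) :
    pvGoB acc (c :: rest) =
      pvGoB ((if ((PySem.Chars.upperChar c == c) && !acc.isEmpty && pvLow rest)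
              then acc ++ ['_'] else acc) ++ [PySem.Chars.upperChar c]) rest := by
  simp only [pvGoB]
  rw [if_neg (by simp [hc])]
  have hm : (match rest with | d :: _ => d != PySem.Chars.upperChar d | [] => false) = pvLow rest := rfl
  rw [hm, Bool.beq_comm (a := c)]
  congr 2
  cases e : acc.isEmpty <;> cases b : (PySem.Chars.upperChar c == c) <;> cases l : pvLow rest <;> simp

-- the three reachable state shapes of A's loop, related to B's direct pass, in one induction
theorem pvMain (l : List Char) :
    (∀ tok, pvFlush (l.foldl pvStepA (none, false, false, tok)) = pvGoB tok l) ∧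
    (∀ tok (u : Char) (wUp : Bool),
      pvFlush (l.foldl pvStepA (some u, wUp, false, tok)) =
        pvGoB ((if (wUp && !tok.isEmpty && pvLow l) then tok ++ ['_'] else tok) ++ [u]) l) ∧
    (∀ tok, pvFlush (l.foldl pvStepA (none, true, true, tok)) =
        pvGoB (if l.isEmpty then tok else tok ++ ['_']) l) := by
  induction l with
  | nil =>
    refine ⟨fun tok => rfl, fun tok u wUp => ?_, fun tok => rfl⟩
    simp [pvFlush, pvGoB, pvLow]
  | cons c rest IH =>
    obtain ⟨IHs, IHp, IHd⟩ := IH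
    by_cases hc : c = '.'
    · subst hc
      have hup : PySem.Chars.upperChar '.' = '.' := by decide
      refine ⟨fun tok => ?_, fun tok u wUp => ?_, fun tok => ?_⟩
      · rw [pvGoB_dot, ← IHd tok]
        simp [pvStepA, hup]
      · have hl : pvLow ('.' :: rest) = false := by simp [pvLow, hup]
        rw [hl, Bool.and_false, if_neg (by simp), pvGoB_dot, ← IHd (tok ++ [u])]
        simp [pvStepA, hup]
      · simp only [List.isEmpty_cons, Bool.false_eq_true, if_false]
        rw [pvGoB_dot, ← IHd (tok ++ ['_'])]
        simp [pvStepA, hup]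
    · have hup : PySem.Chars.upperChar c ≠ '.' := fun h => hc ((pvUpperChar_eq_dot_iff c).1 h)
      have hbu : (PySem.Chars.upperChar c == '.') = false := by simp [hup]
      refine ⟨fun tok => ?_, fun tok u wUp => ?_, fun tok => ?_⟩
      · rw [pvGoB_ne c hc, ← IHp tok (PySem.Chars.upperChar c) (PySem.Chars.upperChar c == c)]
        simp [pvStepA, hbu]
      · rw [pvGoB_ne c hc]
        have hpl : pvLow (c :: rest) = !(PySem.Chars.upperChar c == c) := by
          simp [pvLow, bne, Bool.beq_comm]
        rw [hpl]
        have htok1 : (if (wUp && !tok.isEmpty && !(PySem.Chars.upperChar c == c)) then tok ++ ['_'] else tok)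
            = (if (!(PySem.Chars.upperChar c == c) && wUp && !tok.isEmpty) then tok ++ ['_'] else tok) := by
          cases wUp <;> cases hq : (PySem.Chars.upperChar c == c) <;> cases h : tok.isEmpty <;> simp
        rw [htok1,
          ← IHp ((if (!(PySem.Chars.upperChar c == c) && wUp && !tok.isEmpty) then tok ++ ['_'] else tok) ++ [u])
            (PySem.Chars.upperChar c) (PySem.Chars.upperChar c == c)]
        simp [pvStepA, hbu]
      · simp only [List.isEmpty_cons, Bool.false_eq_true, if_false]
        rw [pvGoB_ne c hc,
          ← IHp (tok ++ ['_']) (PySem.Chars.upperChar c) (PySem.Chars.upperChar c == c)]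
        simp [pvStepA, hbu]

-- ===== VERDICT (by name: the statement is the Claim_ definition above) =====
theorem ModuleToTokenName_spec : Claim_equal_ModuleToTokenName := by
  intro s _
  unfold Spec_ModuleToTokenName ModuleToTokenName ModuleToTokenName_alt
  have h := (pvMain s.toList).1 []
  simpa [pvFlush] using congrArg String.ofList h
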